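-- pv_equiv track=rewrite | github.com/ARQMath/ARQMathCode | Prepare_Dataset/LaTeXML/latex_validation.py | handle_curly_bracket
-- ===== SOURCE A (Python) =====
-- def handle_curly_bracket(latex_str):
--     # handles the curly brackets unmatched
--     stack = []
--     i = 0
--     while i < len(latex_str):
--         char = latex_str[i]
--         if char == '}':
--             # Check if \} then pass
--             if i-1 >= 0 and latex_str[i-1] == "\\":
--                 i += 1
--                 continue
--             # Check if { is in stack then pop it
--             if len(stack) > 0:
--                 stack.pop()
--             else:
--                 # if there is mismatch, insert {. But where?
--                 # it goes back till it finds } and insert { right after than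
--                 # if not found it will in beginning of the latex
--                 # e.g {a+b} c/d} ==> {a+b} {c/d}
--                 j = i - 1
--                 while j > 0 and latex_str[j] != '}':
--                     j -= 1
--                 if latex_str[j] == '}':
--                     j += 1
--                     latex_str = latex_str[:j] + '{' + latex_str[j:]
--                 else:
--                     latex_str = "{" + latex_str
--                 i += 1
--         elif char == '{':
--             if i - 1 < 0 or latex_str[i - 1] != "\\":
--                 stack.append(char)
--         i += 1
--     while len(stack) > 0:
--         latex_str += '}'
--         stack.pop()
--     return latex_str
-- ===== SOURCE B (Python) =====
-- def handle_curly_bracket(latex_str):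
--     # Single pass: build an output buffer, track depth of open '{' and the
--     # buffer position just after the last '}' seen (anchor); unmatched '}'
--     # records a deferred '{' insertion at the anchor; one final rebuild.
--     out = []
--     pending = {}          # buffer position -> number of '{' to insert there
--     anchor = 0            # position in out right after the last '}' written
--     depth = 0             # open, unescaped, unmatched '{' so far
--     prev = None
--     for ch in latex_str:
--         if ch == '}':
--             if prev == '\\':
--                 pass                      # escaped, leave as is
--             elif depth > 0:
--                 depth -= 1                # matches an open '{'
--             else:
--                 pending[anchor] = pending.get(anchor, 0) + 1
--             out.append(ch)
--             anchor = len(out)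
--         elif ch == '{':
--             if prev != '\\':
--                 depth += 1
--             out.append(ch)
--         else:
--             out.append(ch)
--         prev = ch
--     parts = []
--     for i, ch in enumerate(out):
--         parts.append('{' * pending.get(i, 0))
--         parts.append(ch)
--     parts.append('}' * depth)
--     return ''.join(parts)
-- ===== Notes on version B (the rewrite author's own statement) =====
-- stated objective: faster
-- what changed: A repeatedly rescans the string backwards and rebuilds it by slicing on every unmatched '}'; B makes one forward pass that tracks the open-brace depth and the buffer position after the last '}', records each needed '{' as a deferred insertion in a dict, and assembles the result once at the end.
import Mathlib
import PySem

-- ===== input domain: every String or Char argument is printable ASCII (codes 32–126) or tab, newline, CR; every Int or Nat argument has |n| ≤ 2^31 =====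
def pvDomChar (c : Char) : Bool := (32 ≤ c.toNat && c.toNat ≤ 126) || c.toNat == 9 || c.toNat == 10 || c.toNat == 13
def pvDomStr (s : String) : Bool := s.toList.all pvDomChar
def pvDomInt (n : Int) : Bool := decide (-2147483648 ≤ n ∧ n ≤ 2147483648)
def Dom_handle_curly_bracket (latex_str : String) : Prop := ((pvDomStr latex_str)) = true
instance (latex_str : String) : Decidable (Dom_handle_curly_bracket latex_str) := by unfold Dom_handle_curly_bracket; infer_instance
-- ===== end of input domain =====

-- B replaces A's quadratic rescan-and-reinsert string surgery by a single pass with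
-- deferred insertions and one final rebuild (objective: faster).

-- ===== PORT A =====
-- termination measures for the ports (cited by name in decreasing_by)
theorem pvDecrFind {j : Int} (h : 0 < j) : (j - 1).toNat < j.toNat := by omega

theorem pvDecrStep {len i : Nat} (h : i < len) : len - (i + 1) < len - i := by omega

theorem pvDecrIns (s : List Char) (n : Nat) {i : Nat} (h : i < s.length) :
    (List.take n s ++ '{' :: List.drop n s).length - (i + 2) < s.length - i := by
  simp only [List.length_append, List.length_cons, List.length_take, List.length_drop]
  omega

theorem pvDecrPre (s : List Char) {i : Nat} (h : i < s.length) :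
    ('{' :: s).length - (i + 2) < s.length - i := by
  simp only [List.length_cons]
  omega

theorem pvDecrDrop {stack : List Char} (h : 0 < stack.length) :
    stack.dropLast.length < stack.length := by
  simp only [List.length_dropLast]
  omega

-- inner `while j > 0 and latex_str[j] != '}': j -= 1`
def aFind (s : List Char) (j : Int) : Int :=
  if h : 0 < j ∧ PySem.List.pyGet? s j ≠ some '}' then aFind s (j - 1) else j
termination_by j.toNat
decreasing_by exact pvDecrFind h.1

-- main `while i < len(latex_str)` loop; returns the (possibly grown) string and the stack.
-- `latex_str[:j] + '{' + latex_str[j:]` with j = aFind … + 1 ≥ 0 is take/drop at j.toNat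
-- (exact: Python slicing at a nonnegative index).
def aLoop (s : List Char) (stack : List Char) (i : Nat) : List Char × List Char :=
  if h : i < s.length then
    if s[i] = '}' then
      if 1 ≤ i ∧ PySem.List.pyGet? s ((i : Int) - 1) = some '\\' then
        aLoop s stack (i + 1)
      else if 0 < stack.length then
        aLoop s stack.dropLast (i + 1)
      else if PySem.List.pyGet? s (aFind s ((i : Int) - 1)) = some '}' then
        aLoop (s.take ((aFind s ((i : Int) - 1)) + 1).toNat ++
               '{' :: s.drop ((aFind s ((i : Int) - 1)) + 1).toNat) stack (i + 2)
      else
        aLoop ('{' :: s) stack (i + 2)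
    else if s[i] = '{' then
      if i = 0 ∨ PySem.List.pyGet? s ((i : Int) - 1) ≠ some '\\' then
        aLoop s (stack.concat '{') (i + 1)
      else aLoop s stack (i + 1)
    else aLoop s stack (i + 1)
  else (s, stack)
termination_by s.length - i
decreasing_by
  · exact pvDecrStep h
  · exact pvDecrStep h
  · exact pvDecrIns _ _ h
  · exact pvDecrPre _ h
  · exact pvDecrStep h
  · exact pvDecrStep h
  · exact pvDecrStep h


-- final `while len(stack) > 0: latex_str += '}'; stack.pop()`
def aDrain (s : List Char) (stack : List Char) : List Char :=
  if 0 < stack.length then aDrain (s ++ ['}']) stack.dropLast else s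
termination_by stack.length
decreasing_by exact pvDecrDrop (by assumption)

def handle_curly_bracket (latex_str : String) : String :=
  String.ofList (aDrain (aLoop latex_str.toList [] 0).1 (aLoop latex_str.toList [] 0).2)

-- ===== PORT B =====
-- one forward pass of Source B: returns (out, pending, depth)
def bLoop (cs : List Char) (out : List Char) (pending : PySem.Dict Nat Nat)
    (anchor depth : Nat) (prev : Option Char) : List Char × PySem.Dict Nat Nat × Nat :=
  match cs with
  | [] => (out, pending, depth)
  | ch :: rest =>
    if ch = '}' then
      if prev = some '\\' then
        bLoop rest (out.concat ch) pending (out.concat ch).length depth (some ch)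
      else if 0 < depth then
        bLoop rest (out.concat ch) pending (out.concat ch).length (depth - 1) (some ch)
      else
        bLoop rest (out.concat ch) (pending.insert anchor (pending.getD anchor 0 + 1))
          (out.concat ch).length depth (some ch)
    else if ch = '{' then
      if prev ≠ some '\\' then
        bLoop rest (out.concat ch) pending anchor (depth + 1) (some ch)
      else bLoop rest (out.concat ch) pending anchor depth (some ch)
    else bLoop rest (out.concat ch) pending anchor depth (some ch)

-- Source B's final rebuild: '{' * pending.get(i, 0) before the char at each position i
def bRebuild (out : List Char) (pending : PySem.Dict Nat Nat) (i : Nat) : List Char :=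
  match out with
  | [] => []
  | c :: rest => List.replicate (pending.getD i 0) '{' ++ c :: bRebuild rest pending (i + 1)

def handle_curly_bracket_alt (latex_str : String) : String :=
  String.ofList (bRebuild (bLoop latex_str.toList [] PySem.Dict.empty 0 0 none).1
               (bLoop latex_str.toList [] PySem.Dict.empty 0 0 none).2.1 0 ++
             List.replicate (bLoop latex_str.toList [] PySem.Dict.empty 0 0 none).2.2 '}')

-- ===== PRECONDITION & SPEC =====
def Spec_handle_curly_bracket (latex_str : String) (out : String) : Prop := out = handle_curly_bracket_alt latex_str
instance (latex_str : String) (out : String) : Decidable (Spec_handle_curly_bracket latex_str out) := by unfold Spec_handle_curly_bracket; infer_instance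

-- ===== CLAIM (what is proved, stated in full; the proofs are below) =====
def Claim_equal_handle_curly_bracket : Prop := ∀ (latex_str : String), Dom_handle_curly_bracket latex_str → Spec_handle_curly_bracket latex_str (handle_curly_bracket latex_str)

-- ===== LEMMAS AND PROOFS =====

-- rebuild of out ++ [c] appends the pending insertions at position i+|out| and then c
theorem rb_concat (out : List Char) (pen : PySem.Dict Nat Nat) (i : Nat) (c : Char) :
    bRebuild (out ++ [c]) pen i
      = bRebuild out pen i ++ (List.replicate (pen.getD (i + out.length) 0) '{' ++ [c]) := by
  induction out generalizing i with
  | nil => simp [bRebuild]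
  | cons x xs ih =>
    simp only [List.cons_append, bRebuild, ih (i + 1), List.length_cons, List.append_assoc]
    ring_nf

-- a rebuild with no pending insertions from offset i on is the identity
theorem rb_id (out : List Char) (pen : PySem.Dict Nat Nat) (i : Nat)
    (h : ∀ q, i ≤ q → pen.getD q 0 = 0) : bRebuild out pen i = out := by
  induction out generalizing i with
  | nil => rfl
  | cons x xs ih =>
    simp [bRebuild, h i le_rfl, ih (i + 1) (fun q hq => h q (by omega))]

-- no pending insertions from position i+a on: the rebuild splits at a
theorem rb_split (out : List Char) (pen : PySem.Dict Nat Nat) (i a : Nat)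
    (ha : a ≤ out.length) (h : ∀ q, i + a ≤ q → pen.getD q 0 = 0) :
    bRebuild out pen i = bRebuild (out.take a) pen i ++ out.drop a := by
  induction out generalizing i a with
  | nil => simp [bRebuild]
  | cons x xs ih =>
    cases a with
    | zero =>
      simpa [bRebuild] using rb_id (x :: xs) pen i (fun q hq => h q (by omega))
    | succ a' =>
      simp only [List.take_succ_cons, List.drop_succ_cons, bRebuild, List.cons_append,
        List.append_assoc]
      rw [ih (i + 1) a' (by simpa using ha) (fun q hq => h q (by omega))]

-- incrementing pending at i+a inserts one '{' at split point a
theorem rb_insert (out : List Char) (pen : PySem.Dict Nat Nat) (i a : Nat)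
    (ha : a < out.length) (h : ∀ q, i + a ≤ q → pen.getD q 0 = 0) :
    bRebuild out (pen.insert (i + a) (pen.getD (i + a) 0 + 1)) i
      = bRebuild (out.take a) pen i ++ '{' :: out.drop a := by
  induction out generalizing i a with
  | nil => simp at ha
  | cons x xs ih =>
    cases a with
    | zero =>
      have h0 : pen.getD (i + 0) 0 = 0 := h i (by omega)
      have hz : ∀ q, i + 1 ≤ q → (pen.insert (i + 0) (pen.getD (i + 0) 0 + 1)).getD q 0 = 0 := by
        intro q hq
        rw [PySem.Dict.getD_insert, if_neg (by omega)]
        exact h q (by omega)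
      simp only [bRebuild, List.take_zero, List.drop_zero]
      rw [PySem.Dict.getD_insert, if_pos (by omega), rb_id xs _ (i + 1) hz, h0]
      simp [bRebuild]
    | succ a' =>
      simp only [List.take_succ_cons, List.drop_succ_cons, bRebuild]
      rw [PySem.Dict.getD_insert, if_neg (by omega)]
      have := ih (i + 1) a' (by simpa using ha) (fun q hq => h q (by omega))
      rw [show i + (a' + 1) = (i + 1) + a' by omega, this]
      simp

-- the rebuild ends with out's last char
theorem rb_last (out : List Char) (pen : PySem.Dict Nat Nat) (i : Nat) (h : out ≠ []) :
    (bRebuild out pen i).getLast? = out.getLast? := by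
  rcases List.eq_nil_or_concat' out with rfl | ⟨ys, y, rfl⟩
  · exact absurd rfl h
  rw [rb_concat]
  simp [← List.append_assoc]

theorem rb_ne_nil (out : List Char) (pen : PySem.Dict Nat Nat) (i : Nat) (h : out ≠ []) :
    bRebuild out pen i ≠ [] := by
  rcases List.eq_nil_or_concat' out with rfl | ⟨ys, y, rfl⟩
  · exact absurd rfl h
  rw [rb_concat]
  simp

-- reading the char just before position |R| in R ++ t is R's (= out's) last char
theorem pyGet_prefix_last (out t : List Char) (pen : PySem.Dict Nat Nat) (h : out ≠ []) :
    PySem.List.pyGet? (bRebuild out pen 0 ++ t) ((bRebuild out pen 0).length - 1 : Int)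
      = out.getLast? := by
  have hne := rb_ne_nil out pen 0 h
  have hlen : 1 ≤ (bRebuild out pen 0).length := by
    cases hR : bRebuild out pen 0 with
    | nil => exact absurd hR hne
    | cons a l => simp [hR]
  rw [show ((bRebuild out pen 0).length - 1 : Int)
      = (((bRebuild out pen 0).length - 1 : Nat) : Int) by omega]
  rw [PySem.List.pyGet?_natCast]
  rw [List.getElem?_append_left (by omega)]
  rw [← List.getLast?_eq_getElem?]
  exact rb_last out pen 0 h

theorem aFind_base (s : List Char) (j : Int)
    (h : ¬(0 < j ∧ PySem.List.pyGet? s j ≠ some '}')) : aFind s j = j := by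
  rw [aFind, dif_neg h]

theorem aFind_congr (s : List Char) (n : Nat) :
    ∀ (b a : Int), 0 ≤ a → b - a = n →
    (∀ m : Int, a < m → m ≤ b → PySem.List.pyGet? s m ≠ some '}') →
    aFind s b = aFind s a := by
  induction n with
  | zero =>
    intro b a _ h _
    have hba : b = a := by omega
    rw [hba]
  | succ k ih =>
    intro b a ha hb hm
    have hb0 : 0 < b := by omega
    rw [aFind, dif_pos ⟨hb0, hm b (by omega) le_rfl⟩]
    exact ih (b - 1) a ha (by omega) (fun m h1 h2 => hm m h1 (by omega))

theorem drain_replicate (s : List Char) (d : Nat) :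
    aDrain s (List.replicate d '{') = s ++ List.replicate d '}' := by
  induction d generalizing s with
  | zero => rw [aDrain]; simp
  | succ k ih =>
    rw [aDrain, if_pos (by simp), show List.replicate (k + 1) '{' = List.replicate k '{' ++ ['{'] from List.replicate_succ' .., List.dropLast_concat, ih,
      show List.replicate (k + 1) '}' = List.replicate k '}' ++ ['}'] from List.replicate_succ' ..]
    simp [← List.replicate_succ', ← List.replicate_succ]

theorem replicate_dropLast (d : Nat) (c : Char) :
    (List.replicate (d + 1) c).dropLast = List.replicate d c := by
  rw [show List.replicate (d + 1) c = List.replicate d c ++ [c] from List.replicate_succ' .., List.dropLast_concat]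

-- appending a char past the anchor does not change the rendered prefix
theorem rb_concat_zero (out : List Char) (pen : PySem.Dict Nat Nat) (anchor : Nat) (c : Char)
    (h1 : anchor ≤ out.length) (h2 : ∀ q, anchor ≤ q → pen.getD q 0 = 0) :
    bRebuild (out ++ [c]) pen 0 = bRebuild out pen 0 ++ [c] := by
  rw [rb_concat, h2 _ (by omega)]
  simp

-- the main coupling: A's loop on the rendered string tracks B's single pass
theorem main_loop (cs : List Char) :
    ∀ (out : List Char) (pen : PySem.Dict Nat Nat) (anchor depth : Nat),
    anchor ≤ out.length →
    (∀ q, anchor ≤ q → pen.getD q 0 = 0) →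
    (∀ (m : Nat) (h : m < out.length), anchor ≤ m → out[m] ≠ '}') →
    (anchor = 0 ∨ ∃ h : anchor - 1 < out.length, out[anchor - 1] = '}') →
    aLoop (bRebuild out pen 0 ++ cs) (List.replicate depth '{') (bRebuild out pen 0).length
      = (bRebuild (bLoop cs out pen anchor depth out.getLast?).1
           (bLoop cs out pen anchor depth out.getLast?).2.1 0,
         List.replicate (bLoop cs out pen anchor depth out.getLast?).2.2 '{') := by
  induction cs with
  | nil =>
    intro out pen anchor depth h1 h2 h3 h4
    rw [aLoop, dif_neg (by simp)]
    simp [bLoop]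
  | cons c cs' ih =>
    intro out pen anchor depth h1 h2 h3 h4
    have hgd0 : pen.getD out.length 0 = 0 := h2 out.length h1
    have hi : (bRebuild out pen 0).length < (bRebuild out pen 0 ++ c :: cs').length := by simp
    have hsc : (bRebuild out pen 0 ++ c :: cs')[(bRebuild out pen 0).length]'hi = c := by
      rw [List.getElem_append_right le_rfl]; simp
    have hR0iff : (bRebuild out pen 0).length = 0 ↔ out = [] := by
      constructor
      · intro h
        by_contra hne
        exact rb_ne_nil out pen 0 hne (List.eq_nil_of_length_eq_zero h)
      · intro h; subst h; rfl
    rw [aLoop, dif_pos hi]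
    simp only [hsc]
    by_cases hc : c = '}'
    · subst hc
      rw [if_pos rfl]
      -- B side, unfolded once
      conv_rhs => rw [bLoop]
      rw [if_pos rfl]
      by_cases hesc : out.getLast? = some '\\'
      · -- escaped '}' : both sides skip
        have hone : out ≠ [] := by intro h; subst h; simp at hesc
        have hlen1 : 0 < (bRebuild out pen 0).length := List.length_pos_of_ne_nil (rb_ne_nil out pen 0 hone)
        have hpg : PySem.List.pyGet? (bRebuild out pen 0 ++ '}' :: cs') (((bRebuild out pen 0).length : Int) - 1) = some '\\' := by
          rw [pyGet_prefix_last out _ pen hone]; exact hesc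
        rw [if_pos ⟨hlen1, hpg⟩]
        have hRc := rb_concat_zero out pen anchor '}' h1 h2
        have hs : bRebuild out pen 0 ++ '}' :: cs' = bRebuild (out ++ ['}']) pen 0 ++ cs' := by
          rw [hRc]; simp
        have hL : (bRebuild out pen 0).length + 1 = (bRebuild (out ++ ['}']) pen 0).length := by
          rw [hRc]; simp
        rw [hs, hL, ih (out ++ ['}']) pen (out.length + 1) depth (by simp)
          (fun q hq => h2 q (by omega))
          (by intro m hm hm2; simp at hm; omega)
          (Or.inr ⟨by simp, by simp⟩)]
        rw [if_pos hesc]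
        simp [List.concat_eq_append]
      · rw [if_neg hesc]
        have hnesc : ¬(1 ≤ (bRebuild out pen 0).length ∧
            PySem.List.pyGet? (bRebuild out pen 0 ++ '}' :: cs') (((bRebuild out pen 0).length : Int) - 1) = some '\\') := by
          rintro ⟨hl, hp⟩
          have hone : out ≠ [] := by
            intro h; rw [hR0iff.mpr h] at hl; omega
          rw [pyGet_prefix_last out _ pen hone] at hp
          exact hesc hp
        rw [if_neg hnesc]
        by_cases hdep : 0 < depth
        · -- matched '}' : pop
          rw [if_pos (by simpa using hdep), if_pos hdep]
          have hdl : (List.replicate depth '{').dropLast = List.replicate (depth - 1) '{' := by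
            rw [show depth = (depth - 1) + 1 from by omega]
            exact replicate_dropLast _ _
          rw [hdl]
          have hRc := rb_concat_zero out pen anchor '}' h1 h2
          have hs : bRebuild out pen 0 ++ '}' :: cs' = bRebuild (out ++ ['}']) pen 0 ++ cs' := by
            rw [hRc]; simp
          have hL : (bRebuild out pen 0).length + 1 = (bRebuild (out ++ ['}']) pen 0).length := by
            rw [hRc]; simp
          rw [hs, hL, ih (out ++ ['}']) pen (out.length + 1) (depth - 1) (by simp)
            (fun q hq => h2 q (by omega))
            (by intro m hm hm2; simp at hm; omega)
            (Or.inr ⟨by simp, by simp⟩)]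
          simp [List.concat_eq_append]
        · -- unmatched '}' : A inserts '{', B records a pending insertion
          rw [if_neg (by simpa using hdep), if_neg hdep]
          rcases h4 with hA0 | ⟨hlt, hAl⟩
          · -- no '}' written yet: insertion lands at the very beginning
            subst hA0
            have hRid : bRebuild out pen 0 = out := rb_id out pen 0 (fun q _ => h2 q (Nat.zero_le q))
            have hno : ∀ (k : Nat) (h : k < out.length), out[k] ≠ '}' :=
              fun k h => h3 k h (Nat.zero_le k)
            simp only [hRid]
            have hnew : bRebuild (out ++ ['}']) (pen.insert 0 (pen.getD 0 0 + 1)) 0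
                = '{' :: (out ++ ['}']) := by
              have := rb_insert (out ++ ['}']) pen 0 0 (by simp) (fun q hq => h2 q (Nat.zero_le q))
              simpa [bRebuild] using this
            have hs' : '{' :: (out ++ '}' :: cs')
                = bRebuild (out ++ ['}']) (pen.insert 0 (pen.getD 0 0 + 1)) 0 ++ cs' := by
              rw [hnew]; simp
            have hL' : out.length + 2
                = (bRebuild (out ++ ['}']) (pen.insert 0 (pen.getD 0 0 + 1)) 0).length := by
              rw [hnew]; simp
            have hIH := ih (out ++ ['}']) (pen.insert 0 (pen.getD 0 0 + 1)) (out.length + 1) depth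
              (by simp)
              (by intro q hq
                  rw [PySem.Dict.getD_insert, if_neg (by omega)]
                  exact h2 q (Nat.zero_le q))
              (by intro m hm hm2; simp at hm; omega)
              (Or.inr ⟨by simp, by simp⟩)
            by_cases hone : out = []
            · subst hone
              simp only [List.length_nil, List.nil_append, Nat.cast_zero, zero_sub]
              have hfind : aFind ('}' :: cs') (-1 : Int) = -1 :=
                aFind_base _ _ (fun h => absurd h.1 (by omega))
              rw [hfind]
              have hcommon : aLoop ('{' :: '}' :: cs') (List.replicate depth '{') (0 + 2)
                  = (bRebuild (bLoop cs' ([].concat '}') (pen.insert 0 (pen.getD 0 0 + 1))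
                        ([].concat '}').length depth (some '}')).1
                      (bLoop cs' ([].concat '}') (pen.insert 0 (pen.getD 0 0 + 1))
                        ([].concat '}').length depth (some '}')).2.1 0,
                     List.replicate (bLoop cs' ([].concat '}') (pen.insert 0 (pen.getD 0 0 + 1))
                        ([].concat '}').length depth (some '}')).2.2 '{') := by
                have hs0 : ('{' :: '}' :: cs') = bRebuild ([] ++ ['}']) (pen.insert 0 (pen.getD 0 0 + 1)) 0 ++ cs' := by
                  simpa using hs'
                have hL0 : 0 + 2 = (bRebuild ([] ++ ['}']) (pen.insert 0 (pen.getD 0 0 + 1)) 0).length := by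
                  simpa using hL'
                rw [hs0, hL0, hIH]
                simp [List.concat_eq_append]
              split_ifs with hlast
              · simpa using hcommon
              · exact hcommon
            · have hlenpos : 0 < out.length := List.length_pos_of_ne_nil hone
              have hmid : ∀ m : Int, (0 : Int) < m → m ≤ ↑out.length - 1 →
                  PySem.List.pyGet? (out ++ '}' :: cs') m ≠ some '}' := by
                intro m hm1 hm2
                obtain ⟨k, rfl⟩ : ∃ k : Nat, (k : Int) = m := ⟨m.toNat, by omega⟩
                rw [PySem.List.pyGet?_natCast, List.getElem?_append_left (by omega),
                  List.getElem?_eq_getElem (by omega)]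
                intro hcon
                exact hno k (by omega) (Option.some.inj hcon)
              have hfind : aFind (out ++ '}' :: cs') ((out.length : Int) - 1) = 0 := by
                rw [aFind_congr (out ++ '}' :: cs') (out.length - 1) ((out.length : Int) - 1) 0
                  le_rfl (by omega) hmid]
                exact aFind_base _ _ (fun h => absurd h.1 (by omega))
              rw [hfind]
              have hget0 : PySem.List.pyGet? (out ++ '}' :: cs') (0 : Int) = some out[0] := by
                rw [PySem.List.pyGet?_zero, List.getElem?_append_left hlenpos,
                  List.getElem?_eq_getElem hlenpos]
              rw [if_neg (by rw [hget0]; intro hcon; exact hno 0 hlenpos (Option.some.inj hcon))]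
              rw [hs', hL', hIH]
              simp [List.concat_eq_append]
          · -- a '}' was written before: insertion goes right after the last one
            have hanch : 1 ≤ anchor := by
              by_contra hcon
              have h0 : anchor = 0 := by omega
              subst h0
              exact h3 (0 - 1) hlt (Nat.zero_le _) hAl
            have houtne : out ≠ [] := by intro h; subst h; simp at hlt
            have htklen : (out.take anchor).length = anchor := by rw [List.length_take]; omega
            have htkne : out.take anchor ≠ [] := by
              intro hemp
              rw [hemp] at htklen
              simp at htklen
              omega
            have hsplit : bRebuild out pen 0 = bRebuild (out.take anchor) pen 0 ++ out.drop anchor :=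
              rb_split out pen 0 anchor h1 (by simpa using h2)
            have hRApos : 0 < (bRebuild (out.take anchor) pen 0).length :=
              List.length_pos_of_ne_nil (rb_ne_nil _ pen 0 htkne)
            have hRlen : (bRebuild out pen 0).length
                = (bRebuild (out.take anchor) pen 0).length + (out.length - anchor) := by
              rw [hsplit, List.length_append, List.length_drop]
            have hRAlast : (bRebuild (out.take anchor) pen 0).getLast? = some '}' := by
              rw [rb_last _ pen 0 htkne, List.getLast?_eq_getElem?, htklen,
                List.getElem?_take_of_lt (by omega), List.getElem?_eq_getElem hlt, hAl]
            have hgetA : PySem.List.pyGet? (bRebuild out pen 0 ++ '}' :: cs')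
                ((↑(bRebuild (out.take anchor) pen 0).length - 1 : Int)) = some '}' := by
              rw [show ((↑(bRebuild (out.take anchor) pen 0).length - 1 : Int))
                  = (((bRebuild (out.take anchor) pen 0).length - 1 : Nat) : Int) by omega,
                PySem.List.pyGet?_natCast, List.getElem?_append_left (by omega), hsplit,
                List.getElem?_append_left (by omega), ← List.getLast?_eq_getElem?]
              exact hRAlast
            have hmid : ∀ m : Int, (↑(bRebuild (out.take anchor) pen 0).length - 1 : Int) < m →
                m ≤ ↑(bRebuild out pen 0).length - 1 →
                PySem.List.pyGet? (bRebuild out pen 0 ++ '}' :: cs') m ≠ some '}' := by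
              intro m hm1 hm2
              obtain ⟨k, rfl⟩ : ∃ k : Nat, (k : Int) = m := ⟨m.toNat, by omega⟩
              rw [PySem.List.pyGet?_natCast, List.getElem?_append_left (by omega), hsplit,
                List.getElem?_append_right
                  (by omega : (bRebuild (out.take anchor) pen 0).length ≤ k),
                List.getElem?_eq_getElem (by simp [List.length_drop]; omega)]
              intro hcon
              have hk := Option.some.inj hcon
              simp only [List.getElem_drop] at hk
              exact h3 (anchor + (k - (bRebuild (out.take anchor) pen 0).length))
                (by omega) (by omega) hk
            have hfind : aFind (bRebuild out pen 0 ++ '}' :: cs')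
                ((↑(bRebuild out pen 0).length - 1 : Int))
                = ↑(bRebuild (out.take anchor) pen 0).length - 1 := by
              rw [aFind_congr (bRebuild out pen 0 ++ '}' :: cs')
                ((bRebuild out pen 0).length - (bRebuild (out.take anchor) pen 0).length)
                ((↑(bRebuild out pen 0).length - 1 : Int))
                ((↑(bRebuild (out.take anchor) pen 0).length - 1 : Int))
                (by omega) (by omega) hmid]
              exact aFind_base _ _ (fun h => h.2 hgetA)
            rw [hfind, if_pos hgetA]
            have htn : ((↑(bRebuild (out.take anchor) pen 0).length - 1 + 1 : Int)).toNat
                = (bRebuild (out.take anchor) pen 0).length := by omega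
            rw [htn]
            have htake : (bRebuild out pen 0 ++ '}' :: cs').take
                (bRebuild (out.take anchor) pen 0).length = bRebuild (out.take anchor) pen 0 := by
              rw [hsplit, List.append_assoc, List.take_left]
            have hdrop : (bRebuild out pen 0 ++ '}' :: cs').drop
                (bRebuild (out.take anchor) pen 0).length = out.drop anchor ++ '}' :: cs' := by
              rw [hsplit, List.append_assoc, List.drop_left]
            rw [htake, hdrop]
            have hnew : bRebuild (out ++ ['}']) (pen.insert anchor (pen.getD anchor 0 + 1)) 0
                = bRebuild (out.take anchor) pen 0 ++ '{' :: (out.drop anchor ++ ['}']) := by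
              have := rb_insert (out ++ ['}']) pen 0 anchor (by simp; omega) (by simpa using h2)
              simpa [List.take_append_of_le_length h1, List.drop_append_of_le_length h1] using this
            have hs' : bRebuild (out.take anchor) pen 0 ++ '{' :: (out.drop anchor ++ '}' :: cs')
                = bRebuild (out ++ ['}']) (pen.insert anchor (pen.getD anchor 0 + 1)) 0 ++ cs' := by
              rw [hnew]; simp
            have hL' : (bRebuild out pen 0).length + 2
                = (bRebuild (out ++ ['}']) (pen.insert anchor (pen.getD anchor 0 + 1)) 0).length := by
              rw [hnew]
              simp only [List.length_append, List.length_cons, List.length_drop, List.length_nil]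
              omega
            rw [hs', hL']
            rw [ih (out ++ ['}']) (pen.insert anchor (pen.getD anchor 0 + 1)) (out.length + 1) depth
              (by simp)
              (by intro q hq; rw [PySem.Dict.getD_insert, if_neg (by omega)]; exact h2 q (by omega))
              (by intro m hm hm2; simp at hm; omega)
              (Or.inr ⟨by simp, by simp⟩)]
            simp [List.concat_eq_append]
    · rw [if_neg hc]
      conv_rhs => rw [bLoop]
      rw [if_neg hc]
      have hRc := rb_concat_zero out pen anchor c h1 h2
      have hs : bRebuild out pen 0 ++ c :: cs' = bRebuild (out ++ [c]) pen 0 ++ cs' := by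
        rw [hRc]; simp
      have hL : (bRebuild out pen 0).length + 1 = (bRebuild (out ++ [c]) pen 0).length := by
        rw [hRc]; simp
      have h3' : ∀ (m : Nat) (h : m < (out ++ [c]).length), anchor ≤ m → (out ++ [c])[m] ≠ '}' := by
        intro m hm hm2
        rcases Nat.lt_or_ge m out.length with hlt | hge
        · rw [List.getElem_append_left hlt]
          exact h3 m hlt hm2
        · have hmeq : m = out.length := by simp at hm; omega
          subst hmeq
          simp [hc]
      have h4' : anchor = 0 ∨ ∃ h : anchor - 1 < (out ++ [c]).length, (out ++ [c])[anchor - 1] = '}' := by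
        rcases h4 with h | ⟨hlt, hAl⟩
        · exact Or.inl h
        · exact Or.inr ⟨by simp; omega, by rw [List.getElem_append_left hlt]; exact hAl⟩
      by_cases hc2 : c = '{'
      · subst hc2
        rw [if_pos rfl]
        by_cases hesc : out.getLast? = some '\\'
        · have hone : out ≠ [] := by intro h; subst h; simp at hesc
          have hnor : ¬((bRebuild out pen 0).length = 0 ∨
              PySem.List.pyGet? (bRebuild out pen 0 ++ '{' :: cs') (((bRebuild out pen 0).length : Int) - 1) ≠ some '\\') := by
            rintro (h | h)
            · exact hone (hR0iff.mp h)
            · rw [pyGet_prefix_last out _ pen hone] at h; exact h hesc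
          rw [if_neg hnor, if_neg (not_not_intro hesc)]
          rw [hs, hL, ih (out ++ ['{']) pen anchor depth (by simp; omega)
            h2 h3' h4']
          simp [List.concat_eq_append]
        · have hor : (bRebuild out pen 0).length = 0 ∨
              PySem.List.pyGet? (bRebuild out pen 0 ++ '{' :: cs') (((bRebuild out pen 0).length : Int) - 1) ≠ some '\\' := by
            by_cases hone : out = []
            · exact Or.inl (hR0iff.mpr hone)
            · refine Or.inr ?_
              rw [pyGet_prefix_last out _ pen hone]
              exact hesc
          rw [if_pos hor, if_pos hesc]
          have hcat : (List.replicate depth '{').concat '{' = List.replicate (depth + 1) '{' := by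
            simp [List.concat_eq_append, ← List.replicate_succ']
          rw [hcat, hs, hL, ih (out ++ ['{']) pen anchor (depth + 1) (by simp; omega)
            h2 h3' h4']
          simp [List.concat_eq_append]
      · rw [if_neg hc2, if_neg hc2]
        rw [hs, hL, ih (out ++ [c]) pen anchor depth (by simp; omega) h2 h3' h4']
        simp [List.concat_eq_append]

-- ===== VERDICT (by name: the statement is the Claim_ definition above) =====
theorem handle_curly_bracket_spec : Claim_equal_handle_curly_bracket := by
  intro latex_str _
  unfold Spec_handle_curly_bracket handle_curly_bracket handle_curly_bracket_alt
  have h := main_loop latex_str.toList [] PySem.Dict.empty 0 0 (by simp)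
    (by intro q _; simp) (by intro m hm; simp at hm) (Or.inl rfl)
  simp only [bRebuild, List.nil_append, List.length_nil, List.replicate_zero,
    List.getLast?_nil] at h
  rw [h]
  rw [drain_replicate]
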